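-- pv_equiv track=rewrite | github.com/harshit-outsrc/castor | lambda_functions/event_system/events/csep_complete.py | get_shipping_address
-- ===== SOURCE A (Python) =====
-- from typing import Dict, AnyStr
--
-- def get_shipping_address(event_data: Dict) -> Dict:
--     """
--     Get the shipping address from the event data.
--     :param event_data: The event data.
--     :return: A dictionary of the shipping address.
--     """
--     fields = {field.get("field_id"): field for field in event_data.get("fields")}
--
--     requests = {}
--     for key, panda_key in {
--         "street": "StreetAddress",
--         "city": "City",
--         "state": "State",
--         "zipcode": "ZipCode",
--     }.items():
--         requests[key] = fields.get(panda_key, {}).get("value")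
--     return requests
-- ===== SOURCE B (Python) =====
-- def get_shipping_address(event_data):
--     """
--     Get the shipping address from the event data.
--     :param event_data: The event data.
--     :return: A dictionary of the shipping address.
--     """
--     mapping = {
--         "StreetAddress": "street",
--         "City": "city",
--         "State": "state",
--         "ZipCode": "zipcode",
--     }
--     requests = {"street": None, "city": None, "state": None, "zipcode": None}
--     for field in event_data.get("fields"):
--         key = mapping.get(field.get("field_id"))
--         if key is not None:
--             requests[key] = field.get("value")
--     return requests
-- ===== Notes on version B (the rewrite author's own statement) =====
-- stated objective: simpler
-- what changed: Drops the intermediate field_id->field index dict; B pre-initialises the four result keys to None and fills them in one pass over the fields list via an inverse field_id->result-key mapping (last match wins, like A's dict comprehension).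
import Mathlib
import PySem

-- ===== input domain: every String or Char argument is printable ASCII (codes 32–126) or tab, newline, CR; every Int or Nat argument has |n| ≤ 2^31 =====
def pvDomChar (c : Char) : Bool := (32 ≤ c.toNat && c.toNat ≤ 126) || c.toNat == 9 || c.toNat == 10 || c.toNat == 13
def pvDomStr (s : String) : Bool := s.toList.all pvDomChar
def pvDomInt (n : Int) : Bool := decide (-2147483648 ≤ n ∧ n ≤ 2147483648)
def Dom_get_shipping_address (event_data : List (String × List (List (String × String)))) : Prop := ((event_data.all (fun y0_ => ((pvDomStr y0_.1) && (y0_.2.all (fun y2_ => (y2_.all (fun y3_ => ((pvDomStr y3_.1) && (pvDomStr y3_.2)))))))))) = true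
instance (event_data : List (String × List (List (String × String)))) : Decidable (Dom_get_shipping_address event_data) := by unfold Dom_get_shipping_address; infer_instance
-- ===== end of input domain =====

-- B replaces A's field_id->field index dict by one pass over the fields list that fills
-- a pre-initialised four-key result via an inverse field_id->result-key mapping (same values, last match wins).

-- ===== PORT A =====
def get_shipping_address (event_data : List (String × List (List (String × String)))) : List (String × Option String) :=
  let fieldsList := ((PySem.Dict.mk event_data).get? "fields").getD []
  let fields := fieldsList.foldl
    (fun d f => d.insert ((PySem.Dict.mk f).get? "field_id") f) PySem.Dict.empty
  let requests := [("street", "StreetAddress"), ("city", "City"), ("state", "State"), ("zipcode", "ZipCode")].foldl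
    (fun r kp => r.insert kp.1 ((PySem.Dict.mk ((fields.get? (some kp.2)).getD [])).get? "value"))
    PySem.Dict.empty
  requests.items

-- ===== PORT B =====
def get_shipping_address_alt (event_data : List (String × List (List (String × String)))) : List (String × Option String) :=
  let fieldsList := ((PySem.Dict.mk event_data).get? "fields").getD []
  let mapping := PySem.Dict.mk [("StreetAddress", "street"), ("City", "city"), ("State", "state"), ("ZipCode", "zipcode")]
  let requests := fieldsList.foldl
    (fun r f =>
      match (PySem.Dict.mk f).get? "field_id" with
      | none => r
      | some pk =>
        match mapping.get? pk with
        | none => r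
        | some k => r.insert k ((PySem.Dict.mk f).get? "value"))
    (PySem.Dict.mk [("street", none), ("city", none), ("state", none), ("zipcode", none)])
  requests.items

-- ===== PRECONDITION & SPEC =====
-- Pre_ excludes exactly the inputs where event_data has no "fields" key: there event_data.get("fields")
-- is None and both A and B raise TypeError iterating it.
def Pre_get_shipping_address (event_data : List (String × List (List (String × String)))) : Prop :=
  (PySem.Dict.mk event_data).contains "fields" = true
instance (event_data : List (String × List (List (String × String)))) : Decidable (Pre_get_shipping_address event_data) := by unfold Pre_get_shipping_address; infer_instance

def pvWitness_get_shipping_address : (List (String × List (List (String × String)))) :=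
  [("fields", [[("field_id", "City"), ("value", "Paris")]])]

def Spec_get_shipping_address (event_data : List (String × List (List (String × String)))) (out : List (String × Option String)) : Prop := out = get_shipping_address_alt event_data
instance (event_data : List (String × List (List (String × String)))) (out : List (String × Option String)) : Decidable (Spec_get_shipping_address event_data out) := by unfold Spec_get_shipping_address; infer_instance

-- ===== CLAIM (what is proved, stated in full; the proofs are below) =====
def Claim_equal_get_shipping_address : Prop := ∀ (event_data : List (String × List (List (String × String)))), Dom_get_shipping_address event_data → Pre_get_shipping_address event_data → Spec_get_shipping_address event_data (get_shipping_address event_data)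

-- ===== LEMMAS AND PROOFS =====

-- the value A extracts for one panda key from its index dict
def pvVal (d : PySem.Dict (Option String) (List (String × String))) (k : String) : Option String :=
  (PySem.Dict.mk ((d.get? (some k)).getD [])).get? "value"

def pvBstep (r : PySem.Dict String (Option String)) (f : List (String × String)) : PySem.Dict String (Option String) :=
  match (PySem.Dict.mk f).get? "field_id" with
  | none => r
  | some pk =>
    match (PySem.Dict.mk [("StreetAddress", "street"), ("City", "city"), ("State", "state"), ("ZipCode", "zipcode")] : PySem.Dict String String).get? pk with
    | none => r
    | some k => r.insert k ((PySem.Dict.mk f).get? "value")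

theorem pvMain (fs : List (List (String × String)))
    (d : PySem.Dict (Option String) (List (String × String))) :
    fs.foldl pvBstep
      (PySem.Dict.mk [("street", pvVal d "StreetAddress"), ("city", pvVal d "City"),
                      ("state", pvVal d "State"), ("zipcode", pvVal d "ZipCode")]) =
    PySem.Dict.mk
      (let d' := fs.foldl (fun d f => d.insert ((PySem.Dict.mk f).get? "field_id") f) d
       [("street", pvVal d' "StreetAddress"), ("city", pvVal d' "City"),
        ("state", pvVal d' "State"), ("zipcode", pvVal d' "ZipCode")]) := by
  induction fs generalizing d with
  | nil => rfl
  | cons f fs ih =>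
    simp only [List.foldl_cons]
    have step : pvBstep
        (PySem.Dict.mk [("street", pvVal d "StreetAddress"), ("city", pvVal d "City"),
                        ("state", pvVal d "State"), ("zipcode", pvVal d "ZipCode")]) f =
        (let d' := d.insert ((PySem.Dict.mk f).get? "field_id") f
         PySem.Dict.mk [("street", pvVal d' "StreetAddress"), ("city", pvVal d' "City"),
                        ("state", pvVal d' "State"), ("zipcode", pvVal d' "ZipCode")]) := by
      simp only [pvBstep]
      cases hid : (PySem.Dict.mk f).get? "field_id" with
      | none =>
        simp only [pvVal, PySem.Dict.get?_insert]
        simp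
      | some pk =>
        by_cases h1 : pk = "StreetAddress"
        · subst h1
          simp only [pvVal, PySem.Dict.get?_insert]
          simp [PySem.Dict.get?, PySem.Dict.insert]
        by_cases h2 : pk = "City"
        · subst h2
          simp only [pvVal, PySem.Dict.get?_insert]
          simp [PySem.Dict.get?, PySem.Dict.insert]
        by_cases h3 : pk = "State"
        · subst h3
          simp only [pvVal, PySem.Dict.get?_insert]
          simp [PySem.Dict.get?, PySem.Dict.insert]
        by_cases h4 : pk = "ZipCode"
        · subst h4
          simp only [pvVal, PySem.Dict.get?_insert]
          simp [PySem.Dict.get?, PySem.Dict.insert]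
        · have h1' : ("StreetAddress" : String) ≠ pk := fun e => h1 e.symm
          have h2' : ("City" : String) ≠ pk := fun e => h2 e.symm
          have h3' : ("State" : String) ≠ pk := fun e => h3 e.symm
          have h4' : ("ZipCode" : String) ≠ pk := fun e => h4 e.symm
          simp only [pvVal, PySem.Dict.get?_insert]
          simp [PySem.Dict.get?, h1', h2', h3', h4']
    rw [step]
    exact ih _

theorem pvVal_empty (k : String) : pvVal PySem.Dict.empty k = none := rfl

-- ===== VERDICT (by name: the statement is the Claim_ definition above) =====
theorem get_shipping_address_spec : Claim_equal_get_shipping_address := by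
  intro event_data _ _
  show get_shipping_address event_data = get_shipping_address_alt event_data
  unfold get_shipping_address get_shipping_address_alt
  have h := pvMain (((PySem.Dict.mk event_data).get? "fields").getD []) PySem.Dict.empty
  simp only [pvVal_empty] at h
  have hB : (((PySem.Dict.mk event_data).get? "fields").getD []).foldl
      (fun r f =>
        match (PySem.Dict.mk f).get? "field_id" with
        | none => r
        | some pk =>
          match (PySem.Dict.mk [("StreetAddress", "street"), ("City", "city"), ("State", "state"), ("ZipCode", "zipcode")] : PySem.Dict String String).get? pk with
          | none => r
          | some k => r.insert k ((PySem.Dict.mk f).get? "value"))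
      (PySem.Dict.mk [("street", none), ("city", none), ("state", none), ("zipcode", none)]) =
      (((PySem.Dict.mk event_data).get? "fields").getD []).foldl pvBstep
      (PySem.Dict.mk [("street", none), ("city", none), ("state", none), ("zipcode", none)]) := rfl
  simp only [hB, h]
  simp [PySem.Dict.insert, PySem.Dict.empty, pvVal]
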